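-- pv_equiv track=rewrite | github.com/sys-ryan/algorithm-test | 0629/1790.py | calc
-- ===== SOURCE A (Python) =====
-- def calc(n):
--   ans = 0
--   start = 1
--   length = 1
--
--   while start <= n:
--     end = start * 10 - 1
--     if end > n:
--       end = n
--
--     ans += (end - start + 1) * length
--     start *= 10
--     length += 1
--   return ans
-- ===== SOURCE B (Python) =====
-- def calc(n):
--   # Closed form: with d = number of digits of n (number of powers of 10 <= n),
--   # total digits of 1..n equals d*(n+1) minus the repunit 11...1 (d ones).
--   d = 0
--   p = 1
--   while p <= n:
--     d += 1
--     p *= 10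
--   return d * (n + 1) - (10 ** d - 1) // 9
-- ===== Notes on version B (the rewrite author's own statement) =====
-- stated objective: simpler
-- what changed: B replaces A's block-by-block accumulation (clamped ranges weighted by a running length counter) by counting the number of digits d of n and returning the closed form d*(n+1) minus the d-digit repunit; the loop only counts, all arithmetic happens once at the end.
import Mathlib
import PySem

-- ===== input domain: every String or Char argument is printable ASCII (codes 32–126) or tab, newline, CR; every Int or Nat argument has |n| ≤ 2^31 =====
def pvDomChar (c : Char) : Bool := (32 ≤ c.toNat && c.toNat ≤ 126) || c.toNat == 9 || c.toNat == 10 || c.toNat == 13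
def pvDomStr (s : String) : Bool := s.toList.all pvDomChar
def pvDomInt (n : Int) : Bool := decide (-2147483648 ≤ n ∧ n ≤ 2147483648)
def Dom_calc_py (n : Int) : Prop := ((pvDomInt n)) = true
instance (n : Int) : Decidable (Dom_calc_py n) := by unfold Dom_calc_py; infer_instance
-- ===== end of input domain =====

-- B replaces A's block-by-block weighted accumulation by a digit count d plus the
-- closed form d*(n+1) minus the d-digit repunit; objective: simpler.

-- ===== PORT A =====
-- while loop of A: state (start, length, ans); 1 ≤ s justifies termination
def calcLoopA (n s len ans : Int) (hs : 1 ≤ s) : Int :=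
  if h : s ≤ n then
    calcLoopA n (s * 10) (len + 1)
      (ans + ((if s * 10 - 1 > n then n else s * 10 - 1) - s + 1) * len)
      (by omega)
  else ans
termination_by (n + 1 - s).toNat
decreasing_by omega

def calc_py (n : Int) : Int := calcLoopA n 1 1 0 (by norm_num)

-- ===== PORT B =====
-- B's loop only counts the powers of 10 that are ≤ n (the digit count d)
def countLoopB (n p d : Int) (hp : 1 ≤ p) : Int :=
  if h : p ≤ n then countLoopB n (p * 10) (d + 1) (by omega) else d
termination_by (n + 1 - p).toNat
decreasing_by omega

def calc_py_alt (n : Int) : Int :=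
  let d := countLoopB n 1 0 (by norm_num)
  d * (n + 1) - PySem.Int.floordiv (10 ^ d.toNat - 1) 9

-- ===== PRECONDITION & SPEC =====
def Spec_calc_py (n : Int) (out : Int) : Prop := out = calc_py_alt n
instance (n : Int) (out : Int) : Decidable (Spec_calc_py n out) := by unfold Spec_calc_py; infer_instance

-- ===== CLAIM =====
def Claim_equal_calc_py : Prop := ∀ (n : Int), Dom_calc_py n → Spec_calc_py n (calc_py n)

-- ===== LEMMAS AND PROOFS =====
-- cnt n s = number of powers s*10^k ≤ n;  sp n s = their sum Σ s*10^k
def cnt (n s : Int) (hs : 1 ≤ s) : Int :=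
  if h : s ≤ n then cnt n (s * 10) (by omega) + 1 else 0
termination_by (n + 1 - s).toNat
decreasing_by omega

def sp (n s : Int) (hs : 1 ≤ s) : Int :=
  if h : s ≤ n then s + sp n (s * 10) (by omega) else 0
termination_by (n + 1 - s).toNat
decreasing_by omega

theorem cnt_nonneg (n s : Int) (hs : 1 ≤ s) : 0 ≤ cnt n s hs := by
  rw [cnt.eq_def]
  split_ifs with h
  · have := cnt_nonneg n (s * 10) (by omega)
    omega
  · omega
termination_by (n + 1 - s).toNat
decreasing_by omega

-- A's loop in terms of cnt and sp (closed form with carries for len and ans)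
theorem loopA_eq (n s len ans : Int) (hs : 1 ≤ s) (hn : s ≤ n) :
    calcLoopA n s len ans hs =
      ans + (len + cnt n s hs - 1) * (n + 1) - (len - 1) * s - sp n s hs := by
  rw [calcLoopA.eq_def, cnt.eq_def, sp.eq_def]
  simp only [dif_pos hn]
  by_cases h10 : s * 10 ≤ n
  · rw [loopA_eq n (s * 10) (len + 1) _ _ h10]
    have hend : ¬ (s * 10 - 1 > n) := by omega
    simp only [if_neg hend]
    ring
  · rw [calcLoopA.eq_def, cnt.eq_def, sp.eq_def]
    simp only [dif_neg h10]
    have hend : (if s * 10 - 1 > n then n else s * 10 - 1) = n := by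
      split_ifs with h <;> omega
    rw [hend]
    ring
termination_by (n + 1 - s).toNat
decreasing_by omega

-- B's loop computes cnt (with accumulator d)
theorem loopB_eq (n p d : Int) (hp : 1 ≤ p) :
    countLoopB n p d hp = d + cnt n p hp := by
  rw [countLoopB.eq_def, cnt.eq_def]
  split_ifs with h
  · rw [loopB_eq n (p * 10) (d + 1)]
    ring
  · ring
termination_by (n + 1 - p).toNat
decreasing_by omega

-- sp is the repunit scaled by s:  9 * sp + s = s * 10^cnt
theorem sp_repunit (n s : Int) (hs : 1 ≤ s) :
    9 * sp n s hs + s = s * 10 ^ (cnt n s hs).toNat := by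
  rw [sp.eq_def, cnt.eq_def]
  split_ifs with h
  · have ih := sp_repunit n (s * 10) (by omega)
    have hc := cnt_nonneg n (s * 10) (by omega)
    have ht : (cnt n (s * 10) (by omega : (1:Int) ≤ s * 10) + 1).toNat
        = (cnt n (s * 10) (by omega)).toNat + 1 := by omega
    rw [ht, pow_succ]
    ring_nf
    ring_nf at ih
    linarith
  · simp
termination_by (n + 1 - s).toNat
decreasing_by omega

-- ===== VERDICT =====
theorem alt_eq (n : Int) :
    calc_py_alt n = (countLoopB n 1 0 (by norm_num)) * (n + 1)
      - PySem.Int.floordiv (10 ^ (countLoopB n 1 0 (by norm_num)).toNat - 1) 9 := rfl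

theorem calc_py_spec : Claim_equal_calc_py := by
  intro n _
  unfold Spec_calc_py calc_py
  rw [alt_eq, loopB_eq]
  by_cases hn : (1 : Int) ≤ n
  · rw [loopA_eq n 1 1 0 (by norm_num) hn]
    have hrep := sp_repunit n 1 (by norm_num)
    have hfd : PySem.Int.floordiv (10 ^ ((0 : Int) + cnt n 1 (by norm_num)).toNat - 1) 9
        = sp n 1 (by norm_num) := by
      have h9 : (10 : Int) ^ ((0 : Int) + cnt n 1 (by norm_num)).toNat - 1
          = sp n 1 (by norm_num) * 9 := by
        have h0 : ((0 : Int) + cnt n 1 (by norm_num)).toNat = (cnt n 1 (by norm_num)).toNat := by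
          omega
        rw [h0]; linarith
      rw [h9, PySem.Int.floordiv_eq_ediv_of_pos (by norm_num)]
      exact Int.mul_ediv_cancel _ (by norm_num)
    rw [hfd]
    ring
  · rw [calcLoopA.eq_def, cnt.eq_def]
    simp only [dif_neg hn]
    simp [PySem.Int.floordiv]
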